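-- pv_equiv track=rewrite | github.com/riccardopreite/SNLP_Assignment | assignment2/read_corpus_file.py | count_token
-- ===== SOURCE A (Python) =====
-- from collections import Counter
--
-- def count_token(corpus:list) -> dict:
--     token: list = []
--     for sentence in corpus:
--         for word in sentence:
--             token.append(word[0])
--
--     countered_token : dict = Counter(token)
--     unique_token :dict = {token:counter for token,counter in countered_token.items() if counter == 1}
--     return unique_token
-- ===== SOURCE B (Python) =====
-- def count_token(corpus: list) -> dict:
--     first = [word[0] for sentence in corpus for word in sentence]
--     s = sorted(first)
--     n = len(s)
--     singles = set()
--     for i in range(n):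
--         if (i == 0 or s[i - 1] != s[i]) and (i == n - 1 or s[i] != s[i + 1]):
--             singles.add(s[i])
--     return {c: 1 for c in first if c in singles}
-- ===== Notes on version B (the rewrite author's own statement) =====
-- stated objective: alternative
-- what changed: Replaces the Counter hash-count by sort-then-adjacent-scan: sorts the word-initial tokens, collects those whose sorted neighbours both differ (runs of length 1), then emits them in original first-occurrence order.
import Mathlib
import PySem

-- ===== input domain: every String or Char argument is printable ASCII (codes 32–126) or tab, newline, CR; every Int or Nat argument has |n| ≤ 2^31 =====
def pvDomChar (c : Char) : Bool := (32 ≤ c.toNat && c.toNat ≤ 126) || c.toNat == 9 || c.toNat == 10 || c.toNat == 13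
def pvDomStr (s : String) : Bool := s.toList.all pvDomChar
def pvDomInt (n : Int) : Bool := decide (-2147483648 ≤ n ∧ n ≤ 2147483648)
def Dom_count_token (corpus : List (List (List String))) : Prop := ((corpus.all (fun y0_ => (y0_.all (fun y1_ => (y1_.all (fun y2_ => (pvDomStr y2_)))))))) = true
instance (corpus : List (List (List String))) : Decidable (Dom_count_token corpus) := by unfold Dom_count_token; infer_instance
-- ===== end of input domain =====

-- B replaces Counter by sort-then-adjacent-scan: tokens whose sorted neighbours both differ are the unique ones (objective: alternative).

-- ===== PORT A =====
def count_token (corpus : List (List (List String))) : List (String × Int) :=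
  let token : List String := corpus.foldl (fun t sentence =>
    sentence.foldl (fun t word => t ++ [(PySem.List.pyGet? word 0).getD ""]) t) []
  let countered_token : PySem.Dict String Int := PySem.Dict.counter token
  -- dict comprehension over countered_token.items keeping counter == 1
  (countered_token.items.foldl
    (fun (d : PySem.Dict String Int) p => if p.2 == 1 then d.insert p.1 p.2 else d)
    PySem.Dict.empty).items

-- ===== PORT B =====
def count_token_alt (corpus : List (List (List String))) : List (String × Int) :=
  let first : List String := corpus.flatMap (fun sentence =>
    sentence.map (fun word => (PySem.List.pyGet? word 0).getD ""))
  let s : List String := PySem.List.sorted first (fun x => x) false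
  let n : Int := s.length
  let singles : PySem.Set String :=
    (PySem.List.pyRange 0 n 1).foldl
      (fun acc i =>
        if ((i == 0) || !(PySem.List.pyGetD s (i - 1) "" == PySem.List.pyGetD s i ""))
            && ((i == n - 1) || !(PySem.List.pyGetD s i "" == PySem.List.pyGetD s (i + 1) "")) then
          PySem.Set.add acc (PySem.List.pyGetD s i "")
        else acc)
      PySem.Set.empty
  -- dict comprehension over first keeping c in singles
  (first.foldl
    (fun (d : PySem.Dict String Int) c =>
      if PySem.Set.contains singles c then d.insert c 1 else d)
    PySem.Dict.empty).items

-- ===== PRECONDITION & SPEC =====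
-- Pre_ excludes corpora containing an empty word list, on which A's word[0] raises IndexError (B raises there too).
def Pre_count_token (corpus : List (List (List String))) : Prop :=
  ∀ sentence ∈ corpus, ∀ word ∈ sentence, word ≠ []
instance (corpus : List (List (List String))) : Decidable (Pre_count_token corpus) := by
  unfold Pre_count_token; infer_instance
def pvWitness_count_token : List (List (List String)) := [[["a"], ["b"]], [["a", "x"]]]

def Spec_count_token (corpus : List (List (List String))) (out : List (String × Int)) : Prop := out = count_token_alt corpus
instance (corpus : List (List (List String))) (out : List (String × Int)) : Decidable (Spec_count_token corpus out) := by unfold Spec_count_token; infer_instance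

-- ===== CLAIM (what is proved, stated in full; the proofs are below) =====
def Claim_equal_count_token : Prop := ∀ (corpus : List (List (List String))), Dom_count_token corpus → Pre_count_token corpus → Spec_count_token corpus (count_token corpus)

-- ===== LEMMAS AND PROOFS =====

-- membership in a conditional Set.add fold
theorem pv_mem_foldl_add {α : Type} [BEq α] [LawfulBEq α] (l : List Int) (p : Int → Bool)
    (f : Int → α) (acc : PySem.Set α) (x : α) :
    (x ∈ l.foldl (fun acc i => if p i then PySem.Set.add acc (f i) else acc) acc)
      ↔ x ∈ acc ∨ ∃ i ∈ l, p i = true ∧ f i = x := by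
  induction l generalizing acc with
  | nil => simp
  | cons h t ih =>
    simp only [List.foldl_cons, ih, List.mem_cons]
    by_cases hp : p h = true
    · simp only [hp, if_pos, PySem.Set.mem_add]
      constructor
      · rintro ((hx | hx) | ⟨i, hi, hq, hf⟩)
        · exact .inl hx
        · exact .inr ⟨h, .inl rfl, hp, hx.symm⟩
        · exact .inr ⟨i, .inr hi, hq, hf⟩
      · rintro (hx | ⟨i, hi | hi, hq, hf⟩)
        · exact .inl (.inl hx)
        · exact .inl (.inr (hi ▸ hf.symm))
        · exact .inr ⟨i, hi, hq, hf⟩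
    · rw [if_neg (by simp [hp])]
      constructor
      · rintro (hx | ⟨i, hi, hq, hf⟩)
        · exact .inl hx
        · exact .inr ⟨i, .inr hi, hq, hf⟩
      · rintro (hx | ⟨i, hi | hi, hq, hf⟩)
        · exact .inl hx
        · exact absurd (hi ▸ hq) hp
        · exact .inr ⟨i, hi, hq, hf⟩

-- count splits around an index
theorem pv_count_split (l : List String) (c : String) (i : Nat) (h : i < l.length) :
    l.count c = (l.take i).count c + (if l[i] = c then 1 else 0) + (l.drop (i+1)).count c := by
  calc l.count c = ((l.take i) ++ l[i] :: l.drop (i+1)).count c := by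
        rw [← List.drop_eq_getElem_cons h, List.take_append_drop]
    _ = _ := by
        rw [List.count_append, List.count_cons]
        simp only [beq_iff_eq]
        omega

-- two adjacent occurrences force a count of at least two
theorem pv_adjacent_two_le_count (l : List String) (c : String) (i : Nat)
    (h : i + 1 < l.length) (h1 : l[i] = c) (h2 : l[i+1]'h = c) : 2 ≤ l.count c := by
  rw [← List.duplicate_iff_two_le_count, List.duplicate_iff_sublist]
  have hd : l.drop i = l[i] :: l[i+1] :: l.drop (i+2) := by
    rw [List.drop_eq_getElem_cons (by omega), List.drop_eq_getElem_cons h]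
  have hs : List.Sublist [c, c] (l.drop i) := by
    rw [hd, h1, h2]
    exact ((List.nil_sublist _).cons₂ c).cons₂ c
  exact hs.trans (List.drop_sublist i l)

-- in a ≤-sorted list, an element whose neighbours differ occurs exactly once, and conversely
theorem pv_isolated_iff_count_one (s : List String) (hs : s.Pairwise (· ≤ ·)) (c : String) :
    (∃ i : Nat, i < s.length ∧ s.getD i "" = c
        ∧ (i = 0 ∨ ¬ s.getD (i - 1) "" = c)
        ∧ (i = s.length - 1 ∨ ¬ s.getD (i + 1) "" = c))
      ↔ s.count c = 1 := by
  have hmono : ∀ (j k : Nat) (hj : j < s.length) (hk : k < s.length), j ≤ k →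
      s[j] ≤ s[k] := by
    intro j k hj hk hjk
    rcases Nat.lt_or_ge j k with h | h
    · exact List.pairwise_iff_getElem.mp hs j k hj hk h
    · have : j = k := by omega
      subst this; exact le_refl _
  constructor
  · rintro ⟨i, hi, hc, hl, hr⟩
    rw [List.getD_eq_getElem s "" hi] at hc
    have htake : (s.take i).count c = 0 := by
      rw [List.count_eq_zero]
      intro hmem
      obtain ⟨j, hj, he⟩ := List.getElem_of_mem hmem
      have hji : j < i := by simp [List.length_take] at hj; omega
      have hjs : j < s.length := by omega
      rw [List.getElem_take] at he
      have hi0 : i ≠ 0 := by omega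
      rcases hl with h0 | hne
      · exact hi0 h0
      · rw [List.getD_eq_getElem s "" (show i - 1 < s.length by omega)] at hne
        have h1 : s[j] ≤ s[i-1]'(by omega) := hmono j (i-1) hjs (by omega) (by omega)
        have h2 : s[i-1]'(by omega) ≤ s[i] := hmono (i-1) i (by omega) hi (by omega)
        exact hne (le_antisymm (hc ▸ h2) (he ▸ h1))
    have hdrop : (s.drop (i+1)).count c = 0 := by
      rw [List.count_eq_zero]
      intro hmem
      obtain ⟨j, hj, he⟩ := List.getElem_of_mem hmem
      have hjs : i + 1 + j < s.length := by simp at hj; omega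
      rw [List.getElem_drop] at he
      have hil : i ≠ s.length - 1 := by omega
      rcases hr with h0 | hne
      · exact hil h0
      · rw [List.getD_eq_getElem s "" (show i + 1 < s.length by omega)] at hne
        have h1 : s[i+1]'(by omega) ≤ s[i+1+j] := hmono (i+1) (i+1+j) (by omega) hjs (by omega)
        have h2 : s[i] ≤ s[i+1]'(by omega) := hmono i (i+1) hi (by omega) (by omega)
        exact hne (le_antisymm (he ▸ h1) (hc ▸ h2))
    rw [pv_count_split s c i hi, htake, hdrop, if_pos hc]
  · intro hcnt
    have hmem : c ∈ s := List.one_le_count_iff.mp (by omega)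
    obtain ⟨i, hi, hc⟩ := List.getElem_of_mem hmem
    refine ⟨i, hi, by rw [List.getD_eq_getElem s "" hi]; exact hc, ?_, ?_⟩
    · by_cases h0 : i = 0
      · exact .inl h0
      · refine .inr fun hcp => ?_
        rw [List.getD_eq_getElem s "" (show i - 1 < s.length by omega)] at hcp
        have : 2 ≤ s.count c :=
          pv_adjacent_two_le_count s c (i-1) (by omega)
            hcp (by simp only [Nat.sub_add_cancel (by omega : 1 ≤ i)]; exact hc)
        omega
    · by_cases h0 : i = s.length - 1
      · exact .inl h0
      · refine .inr fun hcp => ?_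
        rw [List.getD_eq_getElem s "" (show i + 1 < s.length by omega)] at hcp
        have : 2 ≤ s.count c := pv_adjacent_two_le_count s c i (by omega) hc hcp
        omega

-- B's singles set contains exactly the tokens occurring once in xs
theorem pv_singles_iff (xs : List String) (c : String) :
    (c ∈ (PySem.List.pyRange 0 ((PySem.List.sorted xs (fun x => x) false).length) 1).foldl
      (fun acc i =>
        if ((i == 0) || !(PySem.List.pyGetD (PySem.List.sorted xs (fun x => x) false) (i - 1) ""
              == PySem.List.pyGetD (PySem.List.sorted xs (fun x => x) false) i ""))
            && ((i == ((PySem.List.sorted xs (fun x => x) false).length : Int) - 1)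
              || !(PySem.List.pyGetD (PySem.List.sorted xs (fun x => x) false) i ""
              == PySem.List.pyGetD (PySem.List.sorted xs (fun x => x) false) (i + 1) "")) then
          PySem.Set.add acc (PySem.List.pyGetD (PySem.List.sorted xs (fun x => x) false) i "")
        else acc)
      PySem.Set.empty)
      ↔ xs.count c = 1 := by
  set s := PySem.List.sorted xs (fun x => x) false with hsdef
  have hperm : s.Perm xs := PySem.List.sorted_perm xs (fun x => x) false
  have hpair : s.Pairwise (· ≤ ·) := PySem.List.sorted_pairwise xs (fun x => x)
  rw [← hperm.count_eq, ← pv_isolated_iff_count_one s hpair c, pv_mem_foldl_add]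
  simp only [PySem.Set.empty, List.not_mem_nil, false_or]
  rw [PySem.List.pyRange_zero_natCast s.length]
  constructor
  · rintro ⟨i, hi, hp, hf⟩
    obtain ⟨m, hm', rfl⟩ := List.mem_map.mp hi
    have hm : m < s.length := List.mem_range.mp hm'
    rw [PySem.List.pyGetD_natCast] at hf
    simp only [Bool.and_eq_true, Bool.or_eq_true, beq_iff_eq, Bool.not_eq_eq_eq_not,
      Bool.not_true, beq_eq_false_iff_ne, ne_eq] at hp
    obtain ⟨hp1, hp2⟩ := hp
    refine ⟨m, hm, hf, ?_, ?_⟩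
    · by_cases hm0 : m = 0
      · exact .inl hm0
      · refine .inr fun hcp => ?_
        rcases hp1 with h0 | hne
        · exact hm0 (by exact_mod_cast h0)
        · refine hne ?_
          have e1 : ((m : Int)) - 1 = ((m - 1 : Nat) : Int) := by omega
          rw [e1, PySem.List.pyGetD_natCast, PySem.List.pyGetD_natCast, hcp, hf]
    · by_cases hml : m = s.length - 1
      · exact .inl hml
      · refine .inr fun hcp => ?_
        rcases hp2 with h0 | hne
        · exact hml (by omega)
        · refine hne ?_
          have e1 : ((m : Int)) + 1 = ((m + 1 : Nat) : Int) := by omega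
          rw [e1, PySem.List.pyGetD_natCast, PySem.List.pyGetD_natCast, hcp, hf]
  · rintro ⟨m, hm, hc, h1, h2⟩
    refine ⟨(m : Int), List.mem_map.mpr ⟨m, List.mem_range.mpr hm, rfl⟩, ?_, ?_⟩
    · simp only [Bool.and_eq_true, Bool.or_eq_true, beq_iff_eq, Bool.not_eq_eq_eq_not,
        Bool.not_true, beq_eq_false_iff_ne, ne_eq]
      constructor
      · rcases h1 with h0 | hne
        · exact .inl (by exact_mod_cast congrArg (Nat.cast : Nat → Int) h0)
        · by_cases hm0 : m = 0
          · exact .inl (by simp [hm0])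
          · refine .inr ?_
            have e1 : ((m : Int)) - 1 = ((m - 1 : Nat) : Int) := by omega
            rw [e1, PySem.List.pyGetD_natCast, PySem.List.pyGetD_natCast, hc]
            exact hne
      · rcases h2 with h0 | hne
        · refine .inl ?_
          subst h0
          omega
        · by_cases hml : m = s.length - 1
          · refine .inl ?_
            subst hml
            omega
          · refine .inr ?_
            have e1 : ((m : Int)) + 1 = ((m + 1 : Nat) : Int) := by omega
            rw [e1, PySem.List.pyGetD_natCast, PySem.List.pyGetD_natCast, hc]
            exact fun h => hne h.symm
    · rw [PySem.List.pyGetD_natCast]; exact hc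

-- elements kept by a predicate implying count ≤ 1 are hit once, so dedup commutes with the filter
theorem pv_filter_ofList (xs : List String) (q : String → Bool)
    (h : ∀ c ∈ xs, q c = true → xs.count c ≤ 1) :
    (PySem.Set.ofList xs).filter q = xs.filter q := by
  induction xs with
  | nil => rfl
  | cons x t ih =>
    have ht : ∀ c ∈ t, q c = true → t.count c ≤ 1 := by
      intro c hc hq
      have := h c (List.mem_cons_of_mem _ hc) hq
      have hle : t.count c ≤ (x :: t).count c := by
        rw [List.count_cons]; omega
      omega
    rw [PySem.Set.ofList_cons]
    by_cases hq : q x = true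
    · have hxt : x ∉ t := by
        have := h x List.mem_cons_self hq
        rw [List.count_cons_self] at this
        have := List.count_eq_zero.mp (by omega : t.count x = 0)
        exact this
      have hdis : PySem.Set.discard (PySem.Set.ofList t) x = PySem.Set.ofList t := by
        unfold PySem.Set.discard
        apply List.filter_eq_self.mpr
        intro y hy
        have : y ∈ t := (PySem.Set.mem_ofList _ _).mp hy
        simp only [Bool.not_eq_eq_eq_not, Bool.not_true, beq_eq_false_iff_ne]
        intro he; exact hxt (he ▸ this)
      simp [hq, hdis, ih ht]
    · simp only [List.filter_cons, hq, Bool.false_eq_true, ite_false]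
      unfold PySem.Set.discard
      rw [List.filter_filter]
      have : ∀ y ∈ PySem.Set.ofList t, (q y && !(y == x)) = q y := by
        intro y _
        by_cases he : y = x
        · subst he; simp [hq]
        · simp [he]
      rw [List.filter_congr this, ih ht]

-- A's pipeline on the flattened list reduces to an ordered filter by count = 1
theorem pv_A (xs : List String) :
    ((PySem.Dict.counter xs).items.foldl
      (fun (d : PySem.Dict String Int) p => if p.2 == 1 then d.insert p.1 p.2 else d)
      PySem.Dict.empty).items
    = (xs.filter (fun c => decide (xs.count c = 1))).map (fun c => (c, (1 : Int))) := by
  rw [PySem.Dict.items_counter, ← List.foldl_filter, List.filter_map]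
  rw [PySem.Dict.items_foldl_insert_fresh _ Prod.fst Prod.snd PySem.Dict.empty
      (by intro a _; simp)
      (by
        simp only [List.map_map]
        have : (Prod.fst ∘ fun k => (k, (xs.count k : Int))) = fun k => k := rfl
        rw [this, List.map_id']
        exact List.Nodup.filter _ (PySem.Set.nodup_ofList xs))]
  simp only [PySem.Dict.empty, List.nil_append]
  have e1 : ((PySem.Set.ofList xs).filter ((fun p => p.2 == (1:Int)) ∘ fun k => (k, (xs.count k : Int))))
      = (PySem.Set.ofList xs).filter (fun c => decide (xs.count c = 1)) := by
    apply List.filter_congr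
    intro c _
    by_cases h : xs.count c = 1
    · simp [h]
    · simp [Function.comp, beq_eq_false_iff_ne, Nat.cast_eq_one, h]
  rw [e1, pv_filter_ofList xs _ (by intro c _ hq; simp at hq; omega)]
  rw [List.map_map]
  apply List.map_congr_left
  intro c hc
  have : xs.count c = 1 := by have := (List.mem_filter.mp hc).2; simpa using this
  simp [Function.comp, this]

-- B's final fold reduces to the same ordered filter, given the singles characterisation
theorem pv_B (xs : List String) (singles : PySem.Set String)
    (h : ∀ c, c ∈ singles ↔ xs.count c = 1) :
    (xs.foldl
      (fun (d : PySem.Dict String Int) c =>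
        if PySem.Set.contains singles c then d.insert c 1 else d)
      PySem.Dict.empty).items
    = (xs.filter (fun c => decide (xs.count c = 1))).map (fun c => (c, (1 : Int))) := by
  rw [← List.foldl_filter]
  have e2 : (xs.filter (fun c => PySem.Set.contains singles c))
      = xs.filter (fun c => decide (xs.count c = 1)) := by
    apply List.filter_congr
    intro c _
    by_cases hm : c ∈ singles
    · simp only [(h c).mp hm, decide_true]
      simp
      exact hm
    · have hn : xs.count c ≠ 1 := fun hc => hm ((h c).mpr hc)
      simp [hn]
      exact hm
  rw [e2]
  rw [PySem.Dict.items_foldl_insert_fresh _ (fun c => c) (fun _ => (1 : Int)) PySem.Dict.empty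
      (by intro a _; simp)
      (by
        rw [List.map_id']
        rw [List.nodup_iff_count_le_one]
        intro a
        by_cases ha : a ∈ xs.filter (fun c => decide (xs.count c = 1))
        · have h1 := (List.mem_filter.mp ha).2
          calc List.count a (xs.filter (fun c => decide (xs.count c = 1)))
              ≤ List.count a xs := (List.filter_sublist (l := xs)).count_le a
            _ ≤ 1 := le_of_eq (by simpa using h1)
        · have : List.count a (xs.filter (fun c => decide (xs.count c = 1))) = 0 :=
            List.count_eq_zero.mpr ha
          omega)]
  simp [PySem.Dict.empty]

-- ===== VERDICT (by name: the statement is the Claim_ definition above) =====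
theorem count_token_spec : Claim_equal_count_token := by
  intro corpus _ _
  unfold Spec_count_token count_token count_token_alt
  simp only [PySem.List.foldl_append_singleton_eq_map]
  rw [← List.flatMap_eq_foldl]
  rw [pv_A, pv_B]
  intro c
  exact pv_singles_iff _ c
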